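-- pv_equiv track=rewrite | github.com/xdai02/Data_Structure_and_Algorithm | 高级数据结构与算法/Python/第3章 排序算法/3.2 希尔排序/shell_sort.py | get_hibbard_sequence
-- ===== SOURCE A (Python) =====
-- def get_hibbard_sequence(n):
--     """
--         生成Hibbard序列
--         1, 3, 7, 15, 31, 63, ...
--     """
--     sequence = []
--     i = 1
--     while i <= n:
--         sequence.append(i)
--         i = (i << 1) + 1
--     sequence.reverse()
--     return sequence
-- ===== SOURCE B (Python) =====
-- def get_hibbard_sequence(n):
--     """Hibbard sequence up to n, descending: closed form via bit_length instead of grow-then-reverse."""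
--     if n < 1:
--         return []
--     k = (n + 1).bit_length() - 1   # largest k with 2**k - 1 <= n
--     return [(1 << j) - 1 for j in range(k, 0, -1)]
-- ===== Notes on version B (the rewrite author's own statement) =====
-- stated objective: alternative
-- what changed: B computes the term count k in closed form via (n+1).bit_length()-1 and emits the terms directly in descending order with a comprehension, instead of A's while-loop growing an ascending list and reversing it.
import Mathlib
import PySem

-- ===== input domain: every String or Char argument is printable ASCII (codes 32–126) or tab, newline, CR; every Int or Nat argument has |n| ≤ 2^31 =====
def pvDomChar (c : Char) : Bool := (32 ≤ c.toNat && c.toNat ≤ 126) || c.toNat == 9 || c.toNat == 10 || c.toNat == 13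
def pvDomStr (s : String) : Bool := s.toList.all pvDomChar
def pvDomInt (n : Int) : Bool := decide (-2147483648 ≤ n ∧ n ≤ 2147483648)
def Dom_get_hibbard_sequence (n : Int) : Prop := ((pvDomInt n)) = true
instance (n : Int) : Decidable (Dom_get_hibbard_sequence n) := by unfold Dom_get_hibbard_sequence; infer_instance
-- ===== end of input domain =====

-- B replaces A's grow-then-reverse while-loop by a closed-form term count ((n+1).bit_length()-1)
-- and a descending comprehension; same cost, different decomposition (objective: alternative).

-- ===== PORT A =====
-- while i <= n: sequence.append(i); i = (i << 1) + 1
-- (fuel = n.toNat only bounds the iteration count so the recursion is structural; it is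
--  provably sufficient, so the loop always stops because i > n, exactly like the Python)
def hibLoop (n : Int) (fuel : Nat) (i : Int) (acc : List Int) : List Int :=
  match fuel with
  | 0 => acc
  | f + 1 => if i ≤ n then hibLoop n f (2 * i + 1) (acc ++ [i]) else acc

def get_hibbard_sequence (n : Int) : List Int :=
  (hibLoop n n.toNat 1 []).reverse

-- ===== PORT B =====
-- (n+1).bit_length() is Nat.size of (n+1).toNat (exact for n ≥ 1, the only branch using it)
def get_hibbard_sequence_alt (n : Int) : List Int :=
  if n < 1 then []
  else
    let k : Int := ((n + 1).toNat.size : Int) - 1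
    (PySem.List.pyRange k 0 (-1)).map (fun j => 2 ^ j.toNat - 1)

-- ===== PRECONDITION & SPEC =====
def Spec_get_hibbard_sequence (n : Int) (out : List Int) : Prop := out = get_hibbard_sequence_alt n
instance (n : Int) (out : List Int) : Decidable (Spec_get_hibbard_sequence n out) := by unfold Spec_get_hibbard_sequence; infer_instance

-- ===== CLAIM (what is proved, stated in full; the proofs are below) =====
def Claim_equal_get_hibbard_sequence : Prop := ∀ (n : Int), Dom_get_hibbard_sequence n → Spec_get_hibbard_sequence n (get_hibbard_sequence n)

-- ===== LEMMAS AND PROOFS =====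

lemma hibLoop_stop (n : Int) (fuel : Nat) (i : Int) (acc : List Int) (h : ¬ i ≤ n) :
    hibLoop n fuel i acc = acc := by
  cases fuel <;> simp [hibLoop, h]

lemma hibLoop_step (n : Int) (f : Nat) (i : Int) (acc : List Int) (h : i ≤ n) :
    hibLoop n (f + 1) i acc = hibLoop n f (2 * i + 1) (acc ++ [i]) := by
  simp [hibLoop, h]

lemma hibLoop_pow (n : Int) (k : Nat)
    (hk1 : (2:Int) ^ k - 1 ≤ n) (hk2 : n < (2:Int) ^ (k + 1) - 1) :
    ∀ (d j : Nat), 1 ≤ j → k + 1 = j + d → ∀ (fuel : Nat), d ≤ fuel → ∀ (acc : List Int),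
      hibLoop n fuel ((2:Int) ^ j - 1) acc
        = acc ++ (PySem.List.pyRange (j : Int) ((k : Int) + 1) 1).map (fun t => 2 ^ t.toNat - 1) := by
  intro d
  induction d with
  | zero =>
    intro j hj hjd fuel hfuel acc
    have hj' : j = k + 1 := by omega
    subst hj'
    rw [hibLoop_stop _ _ _ _ (by omega)]
    rw [PySem.List.pyRange_one_eq_nil (by push_cast; omega)]
    simp
  | succ d ih =>
    intro j hj hjd fuel hfuel acc
    obtain ⟨f, rfl⟩ : ∃ f, fuel = f + 1 := ⟨fuel - 1, by omega⟩
    have hjk : j ≤ k := by omega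
    have hle : (2:Int) ^ j - 1 ≤ n := by
      have : (2:Int) ^ j ≤ 2 ^ k := pow_le_pow_right₀ (by norm_num) hjk
      omega
    rw [hibLoop_step _ _ _ _ hle]
    have hpow : 2 * ((2:Int) ^ j - 1) + 1 = 2 ^ (j + 1) - 1 := by ring
    rw [hpow]
    conv_rhs => rw [PySem.List.pyRange_one_cons (show (j:Int) < (k:Int) + 1 by push_cast; omega)]
    rw [ih (j + 1) (by omega) (by omega) f (by omega) (acc ++ [(2:Int) ^ j - 1])]
    simp [List.append_assoc]

theorem get_hibbard_sequence_spec_aux (n : Int) :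
    get_hibbard_sequence n = get_hibbard_sequence_alt n := by
  unfold get_hibbard_sequence get_hibbard_sequence_alt
  by_cases hn : n < 1
  · rw [hibLoop_stop _ _ _ _ (by omega)]
    simp [hn]
  · rw [not_lt] at hn
    set m : Nat := (n + 1).toNat with hm
    have hm2 : 2 ≤ m := by omega
    have hsz : 1 ≤ m.size := by
      have := Nat.size_le (m := m) (n := 0)
      by_contra h; omega
    set k : Nat := m.size - 1 with hkdef
    have hmn : (m : Int) = n + 1 := by omega
    have hk1 : (2:Int) ^ k - 1 ≤ n := by
      have h1 : 2 ^ k ≤ m := Nat.lt_size.mp (by omega)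
      have : ((2:Int)) ^ k ≤ (m : Int) := by exact_mod_cast h1
      omega
    have hk2 : n < (2:Int) ^ (k + 1) - 1 := by
      have h1 : m < 2 ^ (k + 1) := Nat.size_le.mp (by omega)
      have : (m : Int) < (2:Int) ^ (k + 1) := by exact_mod_cast h1
      omega
    have hkfuel : k ≤ n.toNat := by
      have h1 : k < 2 ^ k := Nat.lt_two_pow_self
      have h2 : ((2:Int)) ^ k = ((2 ^ k : Nat) : Int) := by push_cast; ring
      omega
    have h1eq : hibLoop n n.toNat 1 [] = hibLoop n n.toNat ((2:Int) ^ (1:Nat) - 1) [] := by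
      norm_num
    rw [h1eq]
    rw [hibLoop_pow n k hk1 hk2 k 1 (le_refl 1) (by omega) n.toNat hkfuel []]
    have hneg : PySem.List.pyRange (((m.size : Int) - 1)) 0 (-1)
        = (PySem.List.pyRange 1 (((m.size : Int) - 1) + 1) 1).reverse := by
      simpa using PySem.List.pyRange_neg_one_eq_reverse ((m.size : Int) - 1) 0
    have hki : ((k : Int)) = (m.size : Int) - 1 := by omega
    simp only [if_neg (by omega : ¬ n < 1)]
    rw [← hmn] at *
    simp only [List.nil_append]
    rw [hneg, List.map_reverse]
    congr 2
    push_cast [hki]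
    ring_nf

-- ===== VERDICT (by name: the statement is the Claim_ definition above) =====
theorem get_hibbard_sequence_spec : Claim_equal_get_hibbard_sequence := by
  intro n _
  exact get_hibbard_sequence_spec_aux n
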